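-- pv_equiv track=rewrite | github.com/5l1v3r1/plaso | plaso/frontend/presets.py | GetParsersFromCategory
-- ===== SOURCE A (Python) =====
-- categories = {
--     'winxp': [
--         'bencode', 'filestat', 'google_drive', 'java_idx', 'lnk',
--         'mcafee_protection', 'msiecf', 'olecf', 'openxml', 'prefetch',
--         'recycle_bin_info2', 'skydrive_log_error', 'skydrive_log', 'skype',
--         'symantec_scanlog', 'webhist', 'winevt', 'winfirewall', 'winjob',
--         'winreg'],
--     'winxp_slow': [
--         'hachoir', 'winxp'],
--     'win7': [
--         'bencode', 'chrome_cache', 'chrome_cookies', 'chrome_history',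
--         'filestat', 'firefox_cache', 'firefox_downloads', 'firefox_history',
--         'google_drive', 'java_idx', 'lnk', 'mcafee_protection', 'msiecf',
--         'olecf', 'openxml', 'opera_global', 'opera_typed_history', 'prefetch',
--         'recycle_bin', 'safari_history', 'skydrive_log', 'skydrive_log_error',
--         'skype', 'symantec_scanlog', 'winevtx', 'winfirewall', 'winjob',
--         'winreg'],
--     'win7_slow': [
--         'hachoir', 'win7'],
--     'webhist': [
--         'chrome_cache', 'chrome_cookies', 'chrome_history', 'firefox_cache',
--         'firefox_downloads', 'firefox_history', 'java_idx', 'opera_global',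
--         'opera_typed_history', 'msiecf', 'safari_history'],
--     'linux': [
--         'bencode', 'chrome_cache', 'chrome_cookies', 'chrome_history',
--         'filestat', 'firefox_cache', 'firefox_downloads', 'firefox_history',
--         'google_drive', 'java_idx', 'olecf', 'openxml', 'opera_global',
--         'opera_typed_history', 'selinux', 'skype', 'syslog', 'utmp',
--         'xchatlog', 'xchatscrollback', 'zeitgeist'],
--     'macosx': [
--         'appusage', 'asl_log', 'bencode', 'bsm_log', 'chrome_cache',
--         'chrome_cookies', 'chrome_history', 'cups_ipp', 'filestat',
--         'firefox_cache', 'firefox_downloads',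
--         'firefox_history', 'google_drive', 'java_idx', 'ls_quarantine',
--         'mac_appfirewall_log', 'mac_document_versions', 'mac_keychain',
--         'mac_securityd', 'mackeeper_cache', 'macwifi', 'olecf', 'openxml',
--         'opera_global', 'opera_typed_history', 'plist', 'skype', 'syslog',
--         'utmpx'],
--     'android': [
--         'android_calls', 'android_sms'],
-- }
--
-- def GetParsersFromCategory(category):
--   """Return a list of parsers from a parser category."""
--   return_list = []
--   if category not in categories:
--     return return_list
--
--   for item in categories.get(category):
--     if item in categories:
--       return_list.extend(GetParsersFromCategory(item))
--     else:
--       return_list.append(item)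
--
--   return return_list
-- ===== SOURCE B (Python) =====
-- # Same module data, stored compactly as whitespace-joined strings and split once.
-- _RAW = [
--     ("winxp",
--      "bencode filestat google_drive java_idx lnk mcafee_protection msiecf "
--      "olecf openxml prefetch recycle_bin_info2 skydrive_log_error "
--      "skydrive_log skype symantec_scanlog webhist winevt winfirewall winjob "
--      "winreg"),
--     ("winxp_slow", "hachoir winxp"),
--     ("win7",
--      "bencode chrome_cache chrome_cookies chrome_history filestat "
--      "firefox_cache firefox_downloads firefox_history google_drive java_idx "
--      "lnk mcafee_protection msiecf olecf openxml opera_global "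
--      "opera_typed_history prefetch recycle_bin safari_history skydrive_log "
--      "skydrive_log_error skype symantec_scanlog winevtx winfirewall winjob "
--      "winreg"),
--     ("win7_slow", "hachoir win7"),
--     ("webhist",
--      "chrome_cache chrome_cookies chrome_history firefox_cache "
--      "firefox_downloads firefox_history java_idx opera_global "
--      "opera_typed_history msiecf safari_history"),
--     ("linux",
--      "bencode chrome_cache chrome_cookies chrome_history filestat "
--      "firefox_cache firefox_downloads firefox_history google_drive java_idx "
--      "olecf openxml opera_global opera_typed_history selinux skype syslog "
--      "utmp xchatlog xchatscrollback zeitgeist"),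
--     ("macosx",
--      "appusage asl_log bencode bsm_log chrome_cache chrome_cookies "
--      "chrome_history cups_ipp filestat firefox_cache firefox_downloads "
--      "firefox_history google_drive java_idx ls_quarantine "
--      "mac_appfirewall_log mac_document_versions mac_keychain mac_securityd "
--      "mackeeper_cache macwifi olecf openxml opera_global "
--      "opera_typed_history plist skype syslog utmpx"),
--     ("android", "android_calls android_sms"),
-- ]
-- categories = {name: members.split() for name, members in _RAW}
--
--
-- def GetParsersFromCategory(category):
--   """Return a list of parsers from a parser category."""
--   if category not in categories:
--     return []
--   items = list(categories[category])
--   # Level-by-level substitution: replace every category in place by its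
--   # children until only plain parser names remain (depth-first order is
--   # preserved because substitution happens in place).
--   while any(name in categories for name in items):
--     items = [child for name in items
--              for child in categories.get(name, [name])]
--   return items
-- ===== Notes on version B (the rewrite author's own statement) =====
-- stated objective: alternative
-- what changed: Replaces the recursive per-item expansion with an iterative level-by-level substitution to a fixpoint: the category's list is repeatedly rewritten in place, each contained category replaced by its children, until no category names remain (order is preserved because substitution is positional).
import Mathlib
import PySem

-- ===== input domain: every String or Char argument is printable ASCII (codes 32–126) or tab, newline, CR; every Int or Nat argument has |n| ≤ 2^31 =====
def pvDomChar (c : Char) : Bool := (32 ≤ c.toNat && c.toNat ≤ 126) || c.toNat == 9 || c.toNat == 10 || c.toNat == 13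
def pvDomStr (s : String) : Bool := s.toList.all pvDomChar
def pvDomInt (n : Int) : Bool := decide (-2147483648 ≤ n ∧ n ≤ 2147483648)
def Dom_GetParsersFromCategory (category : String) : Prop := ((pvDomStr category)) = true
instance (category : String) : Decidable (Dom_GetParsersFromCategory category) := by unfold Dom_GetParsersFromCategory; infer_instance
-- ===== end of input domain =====

set_option maxRecDepth 100000
set_option maxHeartbeats 4000000


-- B replaces A's recursion by an iterative level-by-level in-place substitution to a fixpoint
-- (same output order); objective: alternative decomposition.

-- ===== PORT A =====
-- A's module-level 'categories' constant, exactly as the source writes it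
def categoriesDict : PySem.Dict String (List String) := PySem.Dict.ofList [
  ("winxp", ["bencode", "filestat", "google_drive", "java_idx", "lnk",
    "mcafee_protection", "msiecf", "olecf", "openxml", "prefetch",
    "recycle_bin_info2", "skydrive_log_error", "skydrive_log", "skype",
    "symantec_scanlog", "webhist", "winevt", "winfirewall", "winjob",
    "winreg"]),
  ("winxp_slow", ["hachoir", "winxp"]),
  ("win7", ["bencode", "chrome_cache", "chrome_cookies", "chrome_history",
    "filestat", "firefox_cache", "firefox_downloads", "firefox_history",
    "google_drive", "java_idx", "lnk", "mcafee_protection", "msiecf",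
    "olecf", "openxml", "opera_global", "opera_typed_history", "prefetch",
    "recycle_bin", "safari_history", "skydrive_log", "skydrive_log_error",
    "skype", "symantec_scanlog", "winevtx", "winfirewall", "winjob",
    "winreg"]),
  ("win7_slow", ["hachoir", "win7"]),
  ("webhist", ["chrome_cache", "chrome_cookies", "chrome_history", "firefox_cache",
    "firefox_downloads", "firefox_history", "java_idx", "opera_global",
    "opera_typed_history", "msiecf", "safari_history"]),
  ("linux", ["bencode", "chrome_cache", "chrome_cookies", "chrome_history",
    "filestat", "firefox_cache", "firefox_downloads", "firefox_history",
    "google_drive", "java_idx", "olecf", "openxml", "opera_global",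
    "opera_typed_history", "selinux", "skype", "syslog", "utmp",
    "xchatlog", "xchatscrollback", "zeitgeist"]),
  ("macosx", ["appusage", "asl_log", "bencode", "bsm_log", "chrome_cache",
    "chrome_cookies", "chrome_history", "cups_ipp", "filestat",
    "firefox_cache", "firefox_downloads",
    "firefox_history", "google_drive", "java_idx", "ls_quarantine",
    "mac_appfirewall_log", "mac_document_versions", "mac_keychain",
    "mac_securityd", "mackeeper_cache", "macwifi", "olecf", "openxml",
    "opera_global", "opera_typed_history", "plist", "skype", "syslog",
    "utmpx"]),
  ("android", ["android_calls", "android_sms"])]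

-- A's recursion, carried on a fuel parameter; the category nesting of the fixed
-- 'categories' dict is at most 3 deep ('winxp_slow' → 'winxp' → 'webhist'), so
-- fuel 8 is never exhausted: the fuel is only a totality guard, not a behaviour change.
def goA : Nat → String → List String
  | 0, _ => []
  | fuel + 1, category =>
    if categoriesDict.contains category then
      (categoriesDict.getD category []).foldl
        (fun return_list item =>
          if categoriesDict.contains item then return_list ++ goA fuel item
          else return_list ++ [item]) []
    else []

def GetParsersFromCategory (category : String) : List String := goA 8 category

-- ===== PORT B =====
-- Source B's module data: whitespace-joined member strings, split once (str.split() = Str.split₀)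
def rawB : List (String × String) := [
  ("winxp",
   "bencode filestat google_drive java_idx lnk mcafee_protection msiecf olecf openxml prefetch recycle_bin_info2 skydrive_log_error skydrive_log skype symantec_scanlog webhist winevt winfirewall winjob winreg"),
  ("winxp_slow", "hachoir winxp"),
  ("win7",
   "bencode chrome_cache chrome_cookies chrome_history filestat firefox_cache firefox_downloads firefox_history google_drive java_idx lnk mcafee_protection msiecf olecf openxml opera_global opera_typed_history prefetch recycle_bin safari_history skydrive_log skydrive_log_error skype symantec_scanlog winevtx winfirewall winjob winreg"),
  ("win7_slow", "hachoir win7"),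
  ("webhist",
   "chrome_cache chrome_cookies chrome_history firefox_cache firefox_downloads firefox_history java_idx opera_global opera_typed_history msiecf safari_history"),
  ("linux",
   "bencode chrome_cache chrome_cookies chrome_history filestat firefox_cache firefox_downloads firefox_history google_drive java_idx olecf openxml opera_global opera_typed_history selinux skype syslog utmp xchatlog xchatscrollback zeitgeist"),
  ("macosx",
   "appusage asl_log bencode bsm_log chrome_cache chrome_cookies chrome_history cups_ipp filestat firefox_cache firefox_downloads firefox_history google_drive java_idx ls_quarantine mac_appfirewall_log mac_document_versions mac_keychain mac_securityd mackeeper_cache macwifi olecf openxml opera_global opera_typed_history plist skype syslog utmpx"),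
  ("android", "android_calls android_sms")]

def categoriesB : PySem.Dict String (List String) :=
  PySem.Dict.ofList (rawB.map (fun nm => (nm.1, PySem.Str.split₀ nm.2)))

-- one substitution level: each category name replaced in place by its children
def stepB (items : List String) : List String :=
  items.flatMap (fun name => categoriesB.getD name [name])

-- the while loop, fueled by the number of iterations; the nesting of the fixed
-- data is at most 3 deep, so fuel 8 is never exhausted (totality guard only).
def loopB : Nat → List String → List String
  | 0, items => items
  | fuel + 1, items =>
    if items.any (fun name => categoriesB.contains name) then loopB fuel (stepB items)
    else items

def GetParsersFromCategory_alt (category : String) : List String :=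
  if categoriesB.contains category then loopB 8 (categoriesB.getD category [])
  else []

-- ===== PRECONDITION & SPEC =====
def Spec_GetParsersFromCategory (category : String) (out : List String) : Prop := out = GetParsersFromCategory_alt category
instance (category : String) (out : List String) : Decidable (Spec_GetParsersFromCategory category out) := by unfold Spec_GetParsersFromCategory; infer_instance

-- ===== CLAIM (what is proved, stated in full; the proofs are below) =====
def Claim_equal_GetParsersFromCategory : Prop := ∀ (category : String), Dom_GetParsersFromCategory category → Spec_GetParsersFromCategory category (GetParsersFromCategory category)

-- ===== LEMMAS AND PROOFS =====

-- Outside the eight literal keys both ports return [] immediately.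
theorem equal_of_not_key (category : String)
    (hA : categoriesDict.contains category = false)
    (hB : categoriesB.contains category = false) :
    GetParsersFromCategory category = GetParsersFromCategory_alt category := by
  simp [GetParsersFromCategory, GetParsersFromCategory_alt, goA, hA, hB]

-- ===== VERDICT (by name: the statement is the Claim_ definition above) =====
theorem GetParsersFromCategory_spec : Claim_equal_GetParsersFromCategory := by
  intro category _
  unfold Spec_GetParsersFromCategory
  by_cases h1 : category = "winxp"; · subst h1; decide
  by_cases h2 : category = "winxp_slow"; · subst h2; decide
  by_cases h3 : category = "win7"; · subst h3; decide
  by_cases h4 : category = "win7_slow"; · subst h4; decide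
  by_cases h5 : category = "webhist"; · subst h5; decide
  by_cases h6 : category = "linux"; · subst h6; decide
  by_cases h7 : category = "macosx"; · subst h7; decide
  by_cases h8 : category = "android"; · subst h8; decide
  have hkeys : ¬ category ∈ ["winxp", "winxp_slow", "win7", "win7_slow",
      "webhist", "linux", "macosx", "android"] := by
    simp [h1, h2, h3, h4, h5, h6, h7, h8]
  apply equal_of_not_key <;>
  · rw [PySem.Dict.contains_eq_isSome_get?]
    rw [show _ = none from (PySem.Dict.get?_eq_none_iff_not_mem_keys _ _).mpr (by
      first
        | exact (by rw [show categoriesDict.keys = ["winxp", "winxp_slow", "win7",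
            "win7_slow", "webhist", "linux", "macosx", "android"] from by decide]; exact hkeys)
        | exact (by rw [show categoriesB.keys = ["winxp", "winxp_slow", "win7",
            "win7_slow", "webhist", "linux", "macosx", "android"] from by decide]; exact hkeys))]
    rfl
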